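-- pv_equiv track=rewrite | github.com/rahulgopinath/rahulgopinath.github.io | notebooks/2021-10-28-context-free-regular-intersection.py | binary_normal_form
-- ===== SOURCE A (Python) =====
-- from collections import defaultdict
--
-- def new_k(k, y, x):
--     return '<%s %s-%s>' % (k[1:-1], str(y), str(x))
--
-- def binary_normal_form(g, s):
--     new_g = defaultdict(list)
--     productions_to_process = [(k, i, 0, r) for k in g for i,r in enumerate(g[k])]
--     while productions_to_process:
--         (k, y, x, r), *productions_to_process =  productions_to_process
--         if x > 0:
--             k_ = new_k(k, y, x)
--         else:
--             k_ = k
--         if len(r) == 0: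
--             new_g[k_].append(r)
--         elif len(r) == 1:
--             new_g[k_].append(r)
--         elif len(r) == 2:
--             new_g[k_].append(r)
--         else:
--             new_g[k_].append(r[:1] + [new_k(k, y, x+1)])
--             remaining = r[1:]
--             prod = (k, y, x+1, remaining)
--             productions_to_process.append(prod)
--     return new_g, s
-- ===== SOURCE B (Python) =====
-- from collections import defaultdict
--
-- def new_k(k, y, x):
--     return '<%s %s-%s>' % (k[1:-1], str(y), str(x))
--
-- def binary_normal_form(g, s):
--     # Level-by-level construction: pass x directly emits, for every rule r that
--     # is long enough, the single production A's work-queue would emit at depth x.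
--     new_g = defaultdict(list)
--     maxlen = 0
--     for rs in g.values():
--         for r in rs:
--             maxlen = max(maxlen, len(r))
--     levels = max(1, maxlen - 1)
--     for x in range(levels):
--         for k in g:
--             for i, r in enumerate(g[k]):
--                 if x == 0 or len(r) >= x + 2:
--                     key = k if x == 0 else new_k(k, i, x)
--                     if len(r) - x <= 2:
--                         new_g[key].append(r[x:])
--                     else:
--                         new_g[key].append(r[x:x+1] + [new_k(k, i, x + 1)])
--     return new_g, s
-- ===== Notes on version B (the rewrite author's own statement) =====
-- stated objective: faster
-- what changed: Replaces A's global FIFO work-queue (whose '(head, *rest) = queue' pop copies the remaining queue, and which re-enqueues each rule's shrinking tail list) by a closed-form level-by-level sweep: pass x directly computes, for every rule still long enough, the one production the queue would process at depth x, so no queue and no tail copies are ever materialised.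
import Mathlib
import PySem

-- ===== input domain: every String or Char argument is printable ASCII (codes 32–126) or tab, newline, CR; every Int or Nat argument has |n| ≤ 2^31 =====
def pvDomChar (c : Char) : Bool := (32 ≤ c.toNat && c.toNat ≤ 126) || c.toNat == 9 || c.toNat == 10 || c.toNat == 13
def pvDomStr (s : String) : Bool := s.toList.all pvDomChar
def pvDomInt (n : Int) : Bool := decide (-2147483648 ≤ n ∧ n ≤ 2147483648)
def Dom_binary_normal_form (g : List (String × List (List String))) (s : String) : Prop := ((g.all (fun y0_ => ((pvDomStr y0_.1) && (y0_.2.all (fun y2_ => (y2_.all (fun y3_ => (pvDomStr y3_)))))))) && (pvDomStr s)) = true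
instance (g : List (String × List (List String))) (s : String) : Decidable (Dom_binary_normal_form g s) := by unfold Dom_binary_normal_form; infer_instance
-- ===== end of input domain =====

-- B replaces A's global FIFO work-queue by a closed-form level-by-level sweep (pass x emits every
-- production the queue would process at depth x), avoiding A's per-pop queue copy; objective: faster (measured).
-- The dict parameter g is traversed by its items (exact for Python dicts, whose keys are unique).

-- ===== PORT A =====
-- new_k(k, y, x) = '<%s %s-%s>' % (k[1:-1], str(y), str(x))   (shared helper of both Pythons)
def pvNewK (k : String) (y x : Int) : String :=
  "<" ++ PySem.Str.slice k (some 1) (some (-1)) ++ " " ++ PySem.Int.toStr y ++ "-" ++ PySem.Int.toStr x ++ ">"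

-- new_g[k_].append(v) on a defaultdict(list)
def pvAppend (d : PySem.Dict String (List (List String))) (k : String) (v : List String) :
    PySem.Dict String (List (List String)) :=
  d.modify k [] (· ++ [v])

-- A's while-loop over productions_to_process (FIFO queue; long rules push their tail at the end)
def pvLoopA : List (String × Int × Int × List String) → PySem.Dict String (List (List String)) →
    PySem.Dict String (List (List String))
  | [], d => d
  | (k, y, x, r) :: rest, d =>
    let k_ := if x > 0 then pvNewK k y x else k
    if r.length = 0 then pvLoopA rest (pvAppend d k_ r)
    else if r.length = 1 then pvLoopA rest (pvAppend d k_ r)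
    else if r.length = 2 then pvLoopA rest (pvAppend d k_ r)
    else pvLoopA (rest ++ [(k, y, x + 1, PySem.List.slice r (some 1) none)])
           (pvAppend d k_ (PySem.List.slice r none (some 1) ++ [pvNewK k y (x + 1)]))
termination_by q _ => (q.map (fun p => p.2.2.2.length + 1)).sum
decreasing_by
  all_goals (simp [PySem.List.slice_from_one]; try omega)

def binary_normal_form (g : List (String × List (List String))) (s : String) :
    (List (String × List (List String))) × String :=
  ((pvLoopA (g.flatMap (fun p => (PySem.List.enumerate p.2 0).map (fun ir => (p.1, ir.1, (0 : Int), ir.2))))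
      PySem.Dict.empty).items, s)

-- ===== PORT B =====
-- one sweep of Source B's outer `for x` body: every production emitted at depth x, in g's order
def pvPass (g : List (String × List (List String))) (x : Int)
    (d : PySem.Dict String (List (List String))) : PySem.Dict String (List (List String)) :=
  g.foldl (fun d p =>
    (PySem.List.enumerate p.2 0).foldl (fun d ir =>
      if x = 0 ∨ PySem.List.len ir.2 ≥ x + 2 then
        pvAppend d (if x = 0 then p.1 else pvNewK p.1 ir.1 x)
          (if PySem.List.len ir.2 - x ≤ 2 then PySem.List.slice ir.2 (some x) none
           else PySem.List.slice ir.2 (some x) (some (x + 1)) ++ [pvNewK p.1 ir.1 (x + 1)])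
      else d) d) d

def binary_normal_form_alt (g : List (String × List (List String))) (s : String) :
    (List (String × List (List String))) × String :=
  let maxlen : Int := g.foldl (fun m p => p.2.foldl (fun m r => max m (PySem.List.len r)) m) 0
  let levels : Int := max 1 (maxlen - 1)
  (((PySem.List.pyRange 0 levels 1).foldl (fun d x => pvPass g x d) PySem.Dict.empty).items, s)

-- ===== PRECONDITION & SPEC =====
def Spec_binary_normal_form (g : List (String × List (List String))) (s : String) (out : (List (String × List (List String))) × String) : Prop := out = binary_normal_form_alt g s
instance (g : List (String × List (List String))) (s : String) (out : (List (String × List (List String))) × String) : Decidable (Spec_binary_normal_form g s out) := by unfold Spec_binary_normal_form; infer_instance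

-- ===== CLAIM (what is proved, stated in full; the proofs are below) =====
def Claim_equal_binary_normal_form : Prop := ∀ (g : List (String × List (List String))) (s : String), Dom_binary_normal_form g s → Spec_binary_normal_form g s (binary_normal_form g s)

-- ===== LEMMAS AND PROOFS =====

abbrev pvQ := String × Int × Int × List String

-- one A-step's dict update, in drop/take form
def pvStep (d : PySem.Dict String (List (List String))) (q : pvQ) :
    PySem.Dict String (List (List String)) :=
  let k_ := if q.2.2.1 > 0 then pvNewK q.1 q.2.1 q.2.2.1 else q.1
  if q.2.2.2.length ≤ 2 then pvAppend d k_ q.2.2.2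
  else pvAppend d k_ (q.2.2.2.take 1 ++ [pvNewK q.1 q.2.1 (q.2.2.1 + 1)])

-- the (0 or 1) queue items one A-step pushes
def pvChildren (q : pvQ) : List pvQ :=
  if q.2.2.2.length ≤ 2 then [] else [(q.1, q.2.1, q.2.2.1 + 1, q.2.2.2.drop 1)]

-- all queue items of depth x, in A's generation order
def pvLvl (g : List (String × List (List String))) (x : Nat) : List pvQ :=
  g.flatMap (fun p =>
    ((PySem.List.enumerate p.2 0).filter (fun ir => x == 0 || decide (ir.2.length ≥ x + 2))).map
      (fun ir => (p.1, ir.1, (x : Int), ir.2.drop x)))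

theorem pvSliceTake1 (r : List String) : PySem.List.slice r none (some 1) = r.take 1 := by
  rw [PySem.List.slice_to r (by decide : (0:Int) ≤ 1)]; rfl

theorem pvSliceDrop1 (r : List String) : PySem.List.slice r (some 1) none = r.drop 1 := by
  rw [PySem.List.slice_from r (by decide : (0:Int) ≤ 1)]; rfl

theorem pvLoopA_cons (q : pvQ) (rest : List pvQ) (d : PySem.Dict String (List (List String))) :
    pvLoopA (q :: rest) d = pvLoopA (rest ++ pvChildren q) (pvStep d q) := by
  obtain ⟨k, y, x, r⟩ := q
  simp only [pvLoopA, pvStep, pvChildren, pvSliceTake1, pvSliceDrop1]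
  split_ifs <;> first | omega | (simp; try rfl)

theorem pvLoopA_shift (q1 q2 : List pvQ) (d : PySem.Dict String (List (List String))) :
    pvLoopA (q1 ++ q2) d = pvLoopA (q2 ++ q1.flatMap pvChildren) (q1.foldl pvStep d) := by
  induction q1 generalizing q2 d with
  | nil => simp
  | cons a q1 ih =>
    rw [List.cons_append, pvLoopA_cons]
    rw [show q1 ++ q2 ++ pvChildren a = q1 ++ (q2 ++ pvChildren a) from by simp]
    rw [ih]
    simp [List.flatMap_cons]

theorem pvFoldlFlatMap {α β γ : Type} (l : List α) (f : α → List β) (step : γ → β → γ) (a : γ) :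
    (l.flatMap f).foldl step a = l.foldl (fun a x => (f x).foldl step a) a := by
  induction l generalizing a with
  | nil => rfl
  | cons x l ih => simp [List.foldl_append, ih]

theorem pvFoldlFilterMap {α β γ : Type} (l : List α) (q : α → Bool) (m : α → β)
    (step : γ → β → γ) (a : γ) :
    ((l.filter q).map m).foldl step a = l.foldl (fun a x => if q x then step a (m x) else a) a := by
  induction l generalizing a with
  | nil => rfl
  | cons x l ih =>
    by_cases hx : q x = true
    · rw [List.filter_cons_of_pos hx]; simp [hx, ih]
    · rw [List.filter_cons_of_neg (by simp_all)]; simp [hx, ih]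

theorem pvChildAux (k : String) (x : Nat) (l : List (Int × List String)) :
    ((l.filter (fun ir => x == 0 || decide (ir.2.length ≥ x + 2))).map
      (fun ir => (k, ir.1, (x : Int), ir.2.drop x))).flatMap pvChildren
    = (l.filter (fun ir => (x + 1) == 0 || decide (ir.2.length ≥ (x + 1) + 2))).map
      (fun ir => (k, ir.1, ((x + 1 : Nat) : Int), ir.2.drop (x + 1))) := by
  induction l with
  | nil => rfl
  | cons ir l ih =>
    simp only [List.filter_cons]
    by_cases h3 : ir.2.length ≥ x + 3
    · rw [if_pos (by simp; omega), if_pos (by simp; omega)]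
      simp only [List.map_cons, List.flatMap_cons, ih, pvChildren]
      rw [if_neg (by simp; omega)]
      simp only [List.singleton_append, List.cons.injEq, List.drop_drop]
      exact ⟨by push_cast; rfl, trivial⟩
    · by_cases hp : (x == 0 || decide (ir.2.length ≥ x + 2)) = true
      · rw [if_pos hp, if_neg (by simp; omega)]
        simp only [List.map_cons, List.flatMap_cons, ih, pvChildren]
        rw [if_pos (by simp; omega)]
        simp
      · rw [if_neg hp, if_neg (by simp; omega)]
        exact ih

theorem pvChildren_lvl (g : List (String × List (List String))) (x : Nat) :
    (pvLvl g x).flatMap pvChildren = pvLvl g (x + 1) := by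
  unfold pvLvl
  rw [List.flatMap_assoc]
  congr 1
  funext p
  exact pvChildAux p.1 x _

theorem pvFoldl_lvl (g : List (String × List (List String))) (x : Nat)
    (d : PySem.Dict String (List (List String))) :
    (pvLvl g x).foldl pvStep d = pvPass g (x : Int) d := by
  unfold pvLvl pvPass
  rw [pvFoldlFlatMap]
  congr 1
  funext d p
  rw [pvFoldlFilterMap]
  congr 1
  funext d ir
  by_cases hq : (x == 0 || decide (ir.2.length ≥ x + 2)) = true
  · have hq' : x = 0 ∨ ir.2.length ≥ x + 2 := by simpa using hq
    rw [if_pos hq, if_pos (by simp [PySem.List.len_eq]; omega)]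
    unfold pvStep
    simp only []
    have hkey : (if (x : Int) > 0 then pvNewK p.1 ir.1 (x : Int) else p.1)
        = (if (x : Int) = 0 then p.1 else pvNewK p.1 ir.1 (x : Int)) := by
      by_cases hx : x = 0 <;> simp [hx] <;> rw [if_pos (by omega)] <;> rfl
    have hval : (if (List.drop x ir.2).length ≤ 2 then List.drop x ir.2
          else List.take 1 (List.drop x ir.2) ++ [pvNewK p.1 ir.1 ((x : Int) + 1)])
        = (if PySem.List.len ir.2 - (x : Int) ≤ 2 then PySem.List.slice ir.2 (some (x : Int)) none
          else PySem.List.slice ir.2 (some (x : Int)) (some ((x : Int) + 1)) ++ [pvNewK p.1 ir.1 ((x : Int) + 1)]) := by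
      by_cases hlong : ir.2.length - x ≤ 2
      · rw [if_pos (by simp; omega), if_pos (by simp [PySem.List.len_eq]; omega),
          PySem.List.slice_from_natCast]
      · rw [if_neg (by simp; omega), if_neg (by simp [PySem.List.len_eq]; omega)]
        rw [show ((x : Int) + 1) = ((x + 1 : Nat) : Int) by push_cast; ring,
          PySem.List.slice_natCast]
        simp
    rw [hkey, ← apply_ite (pvAppend d (if (x : Int) = 0 then p.1 else pvNewK p.1 ir.1 (x : Int))), hval]
  · rw [if_neg hq, if_neg (by simp at hq ⊢; omega)]

theorem pvLvl_empty (g : List (String × List (List String))) (x : Nat) (hx : 1 ≤ x)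
    (hb : ∀ p ∈ g, ∀ r ∈ p.2, r.length ≤ x + 1) : pvLvl g x = [] := by
  unfold pvLvl
  rw [List.flatMap_eq_nil_iff]
  intro p hp
  simp only [List.map_eq_nil_iff, List.filter_eq_nil_iff]
  intro ir hir
  have hmem : ir.2 ∈ p.2 := by
    have h2 : ir.2 ∈ (PySem.List.enumerate p.2 0).map (·.2) := List.mem_map_of_mem hir
    rwa [PySem.List.map_snd_enumerate] at h2
  have := hb p hp ir.2 hmem
  simp
  omega

theorem pvMain (g : List (String × List (List String))) (n x : Nat)
    (d : PySem.Dict String (List (List String))) (h1 : 1 ≤ x + n)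
    (hb : ∀ p ∈ g, ∀ r ∈ p.2, r.length ≤ x + n + 1) :
    pvLoopA (pvLvl g x) d = (List.range' x n).foldl (fun d (y : Nat) => pvPass g (y : Int) d) d := by
  induction n generalizing x d with
  | zero =>
    rw [pvLvl_empty g x (by omega) (by simpa using hb)]
    simp [pvLoopA, List.range']
  | succ n ih =>
    have h := pvLoopA_shift (pvLvl g x) [] d
    rw [List.append_nil] at h
    rw [h, List.nil_append, pvChildren_lvl, pvFoldl_lvl]
    rw [ih (x + 1) _ (by omega) (by intro p hp r hr; have := hb p hp r hr; omega)]
    rw [List.range'_succ]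
    rfl

theorem pvLeFoldlMax {α : Type} (l : List α) (f : α → Int) (b : Int) :
    b ≤ l.foldl (fun m x => max m (f x)) b ∧ ∀ x ∈ l, f x ≤ l.foldl (fun m x => max m (f x)) b := by
  induction l generalizing b with
  | nil => simp
  | cons a l ih =>
    refine ⟨le_trans (le_max_left b (f a)) (ih (max b (f a))).1, ?_⟩
    intro x hx
    rcases List.mem_cons.mp hx with h | h
    · subst h; exact le_trans (le_max_right b (f x)) (ih (max b (f x))).1
    · exact (ih (max b (f a))).2 x h

theorem pvNestedMax (g : List (String × List (List String))) (b : Int) :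
    b ≤ g.foldl (fun m p => p.2.foldl (fun m r => max m (PySem.List.len r)) m) b ∧
    ∀ p ∈ g, ∀ r ∈ p.2, PySem.List.len r ≤
      g.foldl (fun m p => p.2.foldl (fun m r => max m (PySem.List.len r)) m) b := by
  induction g generalizing b with
  | nil => simp
  | cons q g ih =>
    have hin := pvLeFoldlMax q.2 (fun r => PySem.List.len r) b
    refine ⟨le_trans hin.1 (ih _).1, ?_⟩
    intro p hp r hr
    rcases List.mem_cons.mp hp with h | h
    · subst h
      exact le_trans (hin.2 r hr) (ih _).1
    · exact (ih _).2 p h r hr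

theorem pvInit (g : List (String × List (List String))) :
    g.flatMap (fun p => (PySem.List.enumerate p.2 0).map (fun ir => (p.1, ir.1, (0 : Int), ir.2)))
      = pvLvl g 0 := by
  unfold pvLvl
  congr 1
  funext p
  simp

theorem pvFinal (g : List (String × List (List String))) (s : String) :
    binary_normal_form g s = binary_normal_form_alt g s := by
  unfold binary_normal_form binary_normal_form_alt
  simp only []
  set M : Int := g.foldl (fun m p => p.2.foldl (fun m r => max m (PySem.List.len r)) m) 0 with hM
  have hmax := pvNestedMax g 0
  rw [← hM] at hmax
  set L : Int := max 1 (M - 1) with hL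
  have hM0 : 0 ≤ M := hmax.1
  have hL1 : 1 ≤ L := le_max_left _ _
  congr 1
  rw [pvInit, pvMain g L.toNat 0 PySem.Dict.empty (by omega)]
  · rw [PySem.List.pyRange_one, List.foldl_map, List.range_eq_range']
    simp
  · intro p hp r hr
    have := hmax.2 p hp r hr
    simp [PySem.List.len_eq] at this
    omega

-- ===== VERDICT (by name: the statement is the Claim_ definition above) =====
theorem binary_normal_form_spec : Claim_equal_binary_normal_form := by
  intro g s _
  unfold Spec_binary_normal_form
  exact pvFinal g s
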